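-- pv_equiv track=rewrite | github.com/ericof/sketch-a-day | 2023-05-07.py | dentro_circulo
-- ===== SOURCE A (Python) =====
-- def dentro_circulo(circulo_x, circulo_y, raio, x, y, largura):
--     x0 = x
--     x1 = x + largura
--     y0 = y
--     y1 = y + largura
--     pontos = [(x0, y0), (x1, y0), (x1, y1), (x0, y1)]
--     for x, y in pontos:
--         if (x - circulo_x) * (x - circulo_x) + (y - circulo_y) * (
--             y - circulo_y
--         ) <= raio * raio:
--             continue
--         else:
--             return False
--     return True
-- ===== SOURCE B (Python) =====
-- def dentro_circulo(circulo_x, circulo_y, raio, x, y, largura):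
--     dx2 = max((x - circulo_x) ** 2, (x + largura - circulo_x) ** 2)
--     dy2 = max((y - circulo_y) ** 2, (y + largura - circulo_y) ** 2)
--     return dx2 + dy2 <= raio * raio
-- ===== Notes on version B (the rewrite author's own statement) =====
-- stated objective: simpler
-- what changed: Replaces the loop over the four explicit corner points with component-wise maximization of the squared x- and y-deviations and a single comparison.
import Mathlib
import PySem

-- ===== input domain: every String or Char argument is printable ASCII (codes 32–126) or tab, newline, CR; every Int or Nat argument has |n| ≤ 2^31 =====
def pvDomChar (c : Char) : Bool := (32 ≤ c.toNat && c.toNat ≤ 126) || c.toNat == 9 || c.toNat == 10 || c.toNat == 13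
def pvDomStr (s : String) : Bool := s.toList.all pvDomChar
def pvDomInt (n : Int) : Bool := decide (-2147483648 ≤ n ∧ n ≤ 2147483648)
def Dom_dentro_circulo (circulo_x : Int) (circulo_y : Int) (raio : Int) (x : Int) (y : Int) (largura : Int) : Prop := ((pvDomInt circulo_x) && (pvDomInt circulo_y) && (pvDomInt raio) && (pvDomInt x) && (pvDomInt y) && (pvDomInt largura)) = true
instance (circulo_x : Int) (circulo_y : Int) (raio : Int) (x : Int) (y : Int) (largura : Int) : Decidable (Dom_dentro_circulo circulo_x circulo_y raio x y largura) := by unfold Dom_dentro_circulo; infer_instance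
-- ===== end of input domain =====

-- B replaces A's loop over the four corners by component-wise maximization of the squared deviations (simpler).


-- ===== PORT A =====
-- Loop over the corner list with early-return False (A's for/continue/else-return).
def pvLoopA (circulo_x : Int) (circulo_y : Int) (raio : Int) : List (Int × Int) → Bool
  | [] => true
  | (px, py) :: rest =>
    if (px - circulo_x) * (px - circulo_x) + (py - circulo_y) * (py - circulo_y) ≤ raio * raio then
      pvLoopA circulo_x circulo_y raio rest
    else
      false

def dentro_circulo (circulo_x : Int) (circulo_y : Int) (raio : Int) (x : Int) (y : Int) (largura : Int) : Bool :=
  let x0 := x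
  let x1 := x + largura
  let y0 := y
  let y1 := y + largura
  let pontos := [(x0, y0), (x1, y0), (x1, y1), (x0, y1)]
  pvLoopA circulo_x circulo_y raio pontos

-- ===== PORT B =====
-- B: the farthest corner maximizes the squared deviation component-wise.
def dentro_circulo_alt (circulo_x : Int) (circulo_y : Int) (raio : Int) (x : Int) (y : Int) (largura : Int) : Bool :=
  let dx2 := max ((x - circulo_x) * (x - circulo_x)) ((x + largura - circulo_x) * (x + largura - circulo_x))
  let dy2 := max ((y - circulo_y) * (y - circulo_y)) ((y + largura - circulo_y) * (y + largura - circulo_y))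
  decide (dx2 + dy2 ≤ raio * raio)

-- ===== PRECONDITION & SPEC =====
def Spec_dentro_circulo (circulo_x : Int) (circulo_y : Int) (raio : Int) (x : Int) (y : Int) (largura : Int) (out : Bool) : Prop := out = dentro_circulo_alt circulo_x circulo_y raio x y largura
instance (circulo_x : Int) (circulo_y : Int) (raio : Int) (x : Int) (y : Int) (largura : Int) (out : Bool) : Decidable (Spec_dentro_circulo circulo_x circulo_y raio x y largura out) := by unfold Spec_dentro_circulo; infer_instance

-- ===== CLAIM (what is proved, stated in full; the proofs are below) =====
def Claim_equal_dentro_circulo : Prop := ∀ (circulo_x : Int) (circulo_y : Int) (raio : Int) (x : Int) (y : Int) (largura : Int), Dom_dentro_circulo circulo_x circulo_y raio x y largura → Spec_dentro_circulo circulo_x circulo_y raio x y largura (dentro_circulo circulo_x circulo_y raio x y largura)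

-- ===== LEMMAS AND PROOFS =====


-- ===== VERDICT (by name: the statement is the Claim_ definition above) =====
theorem pv_core (a b c d r2 : Int) :
    ((if a + c ≤ r2 then (if b + c ≤ r2 then (if b + d ≤ r2 then (if a + d ≤ r2 then true else false) else false) else false) else false)
      = decide (max a b + max c d ≤ r2)) := by
  split_ifs <;> simp_all <;> omega

theorem dentro_circulo_spec : Claim_equal_dentro_circulo := by
  intro circulo_x circulo_y raio x y largura _
  unfold Spec_dentro_circulo dentro_circulo dentro_circulo_alt pvLoopA
  exact pv_core _ _ _ _ _
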